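-- pv_equiv track=rewrite | github.com/hiquarc/PyQuantumKit | PyQuantumKit/Classical/Common.py | sub_int_bits
-- ===== SOURCE A (Python) =====
-- def sub_int_bits(num : int, subindex : list[int]) -> int:
--     ret = 0
--     j = 0
--     for i in subindex:
--         curbit = 0 if (num & (1 << i)) == 0 else 1
--         ret |= (curbit << j)
--         j += 1
--     return ret
-- ===== SOURCE B (Python) =====
-- def sub_int_bits(num: int, subindex: list[int]) -> int:
--     ret = 0
--     for i in reversed(subindex):
--         ret = (ret << 1) | ((num >> i) & 1)
--     return ret
-- ===== Notes on version B (the rewrite author's own statement) =====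
-- stated objective: simpler
-- what changed: Replaces the position-counter OR-packing loop (ret |= curbit << j with a separate j counter) by a Horner-style accumulator over the reversed index list: ret = (ret << 1) | ((num >> i) & 1), dropping the counter and the mask test.
import Mathlib
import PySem

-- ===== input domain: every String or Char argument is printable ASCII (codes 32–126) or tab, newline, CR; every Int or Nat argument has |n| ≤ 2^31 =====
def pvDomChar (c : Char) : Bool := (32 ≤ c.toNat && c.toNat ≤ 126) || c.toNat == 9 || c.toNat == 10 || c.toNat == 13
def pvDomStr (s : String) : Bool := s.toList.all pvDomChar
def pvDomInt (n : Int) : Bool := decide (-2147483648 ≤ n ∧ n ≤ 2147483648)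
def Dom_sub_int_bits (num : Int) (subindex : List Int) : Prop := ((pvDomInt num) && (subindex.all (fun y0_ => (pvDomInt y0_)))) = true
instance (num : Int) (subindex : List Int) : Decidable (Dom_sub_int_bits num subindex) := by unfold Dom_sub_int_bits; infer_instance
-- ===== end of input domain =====

-- B replaces A's position-counter OR-packing loop by a Horner-style shift accumulator over the
-- reversed index list (simpler: no separate bit-position counter, no mask test).

-- ===== PORT A =====
-- state: (ret, j); 'num & (1 << i)' is PySem.Int.band num (Int.shiftLeft 1 i.toNat) (Pre_ gives
-- 0 <= i, where Python's '<<' is defined); 'ret |= curbit << j' via PySem.Int.bor; j a Nat counter.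
def sub_int_bits (num : Int) (subindex : List Int) : Int :=
  (subindex.foldl
    (fun (s : Int × Nat) i =>
      let curbit : Int := if PySem.Int.band num (Int.shiftLeft 1 i.toNat) = 0 then 0 else 1
      (PySem.Int.bor s.1 (Int.shiftLeft curbit s.2), s.2 + 1))
    ((0 : Int), (0 : Nat))).1

-- ===== PORT B =====
-- 'for i in reversed(subindex): ret = (ret << 1) | ((num >> i) & 1)'
def sub_int_bits_alt (num : Int) (subindex : List Int) : Int :=
  subindex.reverse.foldl
    (fun ret i => PySem.Int.bor (Int.shiftLeft ret 1) (PySem.Int.band (Int.shiftRight num i.toNat) 1))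
    (0 : Int)

-- ===== PRECONDITION & SPEC =====
-- Python's '1 << i' (in A) and 'num >> i' (in B) both raise ValueError for a negative shift
-- count, so Pre_ admits exactly the subindex lists with nonnegative entries.
def Pre_sub_int_bits (num : Int) (subindex : List Int) : Prop :=
  ∀ i ∈ subindex, 0 ≤ i
instance (num : Int) (subindex : List Int) : Decidable (Pre_sub_int_bits num subindex) := by
  unfold Pre_sub_int_bits; infer_instance
def pvWitness_sub_int_bits : Int × List Int := (5, [0, 2])

def Spec_sub_int_bits (num : Int) (subindex : List Int) (out : Int) : Prop := out = sub_int_bits_alt num subindex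
instance (num : Int) (subindex : List Int) (out : Int) : Decidable (Spec_sub_int_bits num subindex out) := by unfold Spec_sub_int_bits; infer_instance

-- ===== CLAIM (what is proved, stated in full; the proofs are below) =====
def Claim_equal_sub_int_bits : Prop := ∀ (num : Int) (subindex : List Int), Dom_sub_int_bits num subindex → Pre_sub_int_bits num subindex → Spec_sub_int_bits num subindex (sub_int_bits num subindex)

-- ===== LEMMAS AND PROOFS =====

-- Nat: OR of disjoint summands is addition (low-bit and high-bit special cases).
lemma nat_lor_two_mul (x b : Nat) (hb : b < 2) : 2 * x ||| b = 2 * x + b := by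
  interval_cases b
  · simp
  · have h := Nat.lor_bit false x true 0
    simp [Nat.bit] at h ⊢
    omega

lemma nat_lor_pow (j : Nat) : ∀ x : Nat, x < 2 ^ j → x ||| 2 ^ j = x + 2 ^ j := by
  induction j with
  | zero => intro x hx; interval_cases x; simp
  | succ j ih =>
    intro x hx
    have hbit : Nat.bit (decide (x % 2 = 1)) (x / 2) = x := by
      by_cases h2 : x % 2 = 1 <;> simp [Nat.bit, h2] <;> omega
    have hpow : Nat.bit false (2 ^ j) = 2 ^ (j + 1) := by
      simp [Nat.bit]; ring
    have hx2 : x / 2 < 2 ^ j := by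
      have h2p : (2 : Nat) ^ (j + 1) = 2 * 2 ^ j := by ring
      omega
    calc x ||| 2 ^ (j + 1)
        = Nat.bit (decide (x % 2 = 1)) (x / 2) ||| Nat.bit false (2 ^ j) := by
          rw [hbit, hpow]
      _ = Nat.bit (decide (x % 2 = 1) || false) (x / 2 ||| 2 ^ j) := Nat.lor_bit _ _ _ _
      _ = Nat.bit (decide (x % 2 = 1)) (x / 2 + 2 ^ j) := by rw [ih _ hx2, Bool.or_false]
      _ = x + 2 ^ (j + 1) := by
          have h2p : (2 : Nat) ^ (j + 1) = 2 * 2 ^ j := by ring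
          by_cases h2 : x % 2 = 1 <;> simp [Nat.bit, h2] <;> omega

-- Int: shifting a natural number left by one doubles it.
lemma int_shiftLeft_one_natCast (s : Nat) : Int.shiftLeft ((s : Nat) : Int) 1 = ((2 * s : Nat) : Int) := by
  have h : s <<< 1 = 2 * s := by rw [Nat.shiftLeft_eq]; ring
  show Int.ofNat (s <<< 1) = Int.ofNat (2 * s)
  rw [h]

def pvBit (num : Int) (k : Nat) : Int := PySem.Int.band (Int.shiftRight num k) 1
lemma curbit_eq (num : Int) (k : Nat) :
    (if PySem.Int.band num (Int.shiftLeft 1 k) = 0 then (0 : Int) else 1) = pvBit num k := by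
  cases num with
  | ofNat n =>
    have hL : (Int.shiftLeft 1 k) = ((2 ^ k : Nat) : Int) := by
      show Int.shiftLeft (Int.ofNat 1) k = _
      simp [Int.shiftLeft, Nat.one_shiftLeft]
    have hband : PySem.Int.band (Int.ofNat n) (Int.shiftLeft 1 k)
        = (((n.testBit k).toNat * 2 ^ k : Nat) : Int) := by
      rw [hL]
      show PySem.Int.band ((n : Nat) : Int) ((2 ^ k : Nat) : Int) = _
      rw [PySem.Int.band_natCast, Nat.and_two_pow]
    have hbit : pvBit (Int.ofNat n) k = (((n >>> k) % 2 : Nat) : Int) := by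
      unfold pvBit
      show PySem.Int.band (((n >>> k : Nat)) : Int) 1 = _
      have : (1 : Int) = ((1 : Nat) : Int) := rfl
      rw [this, PySem.Int.band_natCast, Nat.and_one_is_mod]
    rw [hband, hbit]
    have htb : n.testBit k = decide (n / 2 ^ k % 2 = 1) := Nat.testBit_eq_decide_div_mod_eq
    rw [Nat.shiftRight_eq_div_pow]
    have hpos : (0:Nat) < 2 ^ k := Nat.two_pow_pos k
    by_cases h : n / 2 ^ k % 2 = 1
    · have ht : n.testBit k = true := by rw [htb]; simp [h]
      rw [ht, h]
      have hne : ¬ (((Bool.toNat true * 2 ^ k : Nat)) : Int) = 0 := by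
        simp
      rw [if_neg hne]
      norm_num
    · have ht : n.testBit k = false := by rw [htb]; simp [h]
      rw [ht]
      have h0 : n / 2 ^ k % 2 = 0 := by omega
      rw [h0]
      simp
  | negSucc m =>
    have hneg : ¬ (0 : Int) ≤ Int.negSucc m := by
      have := Int.negSucc_lt_zero m; omega
    have hL : (Int.shiftLeft 1 k) = ((2 ^ k : Nat) : Int) := by
      show Int.shiftLeft (Int.ofNat 1) k = _
      simp [Int.shiftLeft, Nat.one_shiftLeft]
    have ha1 : (-(Int.negSucc m) - 1) = (m : Int) := by
      rw [Int.neg_negSucc]; push_cast; ring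
    have hband : PySem.Int.band (Int.negSucc m) (Int.shiftLeft 1 k)
        = ((2 ^ k - (2 ^ k &&& m) : Nat) : Int) := by
      rw [hL]
      unfold PySem.Int.band
      rw [if_neg hneg, if_pos (by positivity), ha1]
      rw [Int.toNat_natCast, Int.toNat_natCast]
    have hbit : pvBit (Int.negSucc m) k = ((1 - (1 &&& (m >>> k)) : Nat) : Int) := by
      unfold pvBit
      have hsr : Int.shiftRight (Int.negSucc m) k = Int.negSucc (m >>> k) := rfl
      rw [hsr]
      unfold PySem.Int.band
      have hneg2 : ¬ (0 : Int) ≤ Int.negSucc (m >>> k) := by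
        have := Int.negSucc_lt_zero (m >>> k); omega
      rw [if_neg hneg2, if_pos (by omega)]
      have ha2 : (-(Int.negSucc (m >>> k)) - 1) = ((m >>> k : Nat) : Int) := by
        rw [Int.neg_negSucc]; push_cast; ring
      rw [ha2, Int.toNat_one, Int.toNat_natCast]
    rw [hband, hbit]
    have htp : 2 ^ k &&& m = 2 ^ k * (m.testBit k).toNat := Nat.two_pow_and m k
    have htb : m.testBit k = decide (m / 2 ^ k % 2 = 1) := Nat.testBit_eq_decide_div_mod_eq
    have h1m : 1 &&& (m >>> k) = (m >>> k) &&& 1 := Nat.land_comm _ _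
    rw [htp, h1m, Nat.and_one_is_mod, Nat.shiftRight_eq_div_pow]
    have hpos : (0:Nat) < 2 ^ k := Nat.two_pow_pos k
    by_cases h : m / 2 ^ k % 2 = 1
    · have ht : m.testBit k = true := by rw [htb]; simp [h]
      rw [ht, h]
      norm_num
    · have ht : m.testBit k = false := by rw [htb]; simp [h]
      rw [ht]
      have h0 : m / 2 ^ k % 2 = 0 := by omega
      rw [h0]
      have hne : ¬ (((2 ^ k - 2 ^ k * Bool.toNat false : Nat)) : Int) = 0 := by
        simp
      rw [if_neg hne]
      norm_num

lemma pvBit_zero_or_one (num : Int) (k : Nat) : pvBit num k = 0 ∨ pvBit num k = 1 := by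
  unfold pvBit
  rw [PySem.Int.band_one]
  have h1 := PySem.Int.mod_nonneg (Int.shiftRight num k) (b := 2) (by omega)
  have h2 := PySem.Int.mod_lt (Int.shiftRight num k) (b := 2) (by omega)
  omega

-- the packed value, as a structural recursion (first index -> lowest bit)
def pvS (num : Int) : List Int → Int
  | [] => 0
  | i :: t => pvBit num i.toNat + 2 * pvS num t

lemma pvS_nonneg (num : Int) (l : List Int) : 0 ≤ pvS num l := by
  induction l with
  | nil => simp [pvS]
  | cons i t ih =>
    rcases pvBit_zero_or_one num i.toNat with h | h <;> simp [pvS, h] <;> omega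

-- OR of a value below 2^j with a bit shifted to position j is addition (Int version).
lemma int_bor_shifted (r : Int) (j : Nat) (b : Int) (hr0 : 0 ≤ r) (hr : r < 2 ^ j)
    (hb : b = 0 ∨ b = 1) : PySem.Int.bor r (Int.shiftLeft b j) = r + b * 2 ^ j := by
  rcases hb with hb | hb
  · subst hb
    have h0 : (Int.shiftLeft (0 : Int) j) = 0 := by
      show Int.shiftLeft (Int.ofNat 0) j = 0
      simp [Int.shiftLeft]
    rw [h0]
    simpa using PySem.Int.bor_zero r
  · subst hb
    have hL : (Int.shiftLeft (1 : Int) j) = ((2 ^ j : Nat) : Int) := by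
      show Int.shiftLeft (Int.ofNat 1) j = _
      simp [Int.shiftLeft, Nat.one_shiftLeft]
    have hrn : r = ((r.toNat : Nat) : Int) := (Int.toNat_of_nonneg hr0).symm
    have hc : (((2 ^ j : Nat)) : Int) = (2 : Int) ^ j := by push_cast; ring
    have hrlt : r.toNat < 2 ^ j := by omega
    rw [hL, hrn, PySem.Int.bor_natCast, nat_lor_pow j r.toNat hrlt]
    push_cast
    rw [Int.toNat_of_nonneg hr0]
    ring

-- B's Horner loop computes pvS.
lemma alt_eq_pvS (num : Int) (l : List Int) : sub_int_bits_alt num l = pvS num l := by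
  unfold sub_int_bits_alt
  rw [List.foldl_reverse]
  induction l with
  | nil => simp [pvS]
  | cons i t ih =>
    rw [List.foldr_cons, ih]
    have hs0 : 0 ≤ pvS num t := pvS_nonneg num t
    have hsn : pvS num t = (((pvS num t).toNat : Nat) : Int) := (Int.toNat_of_nonneg hs0).symm
    have hbv := pvBit_zero_or_one num i.toNat
    have hbb : PySem.Int.band (Int.shiftRight num i.toNat) 1 = pvBit num i.toNat := rfl
    rcases hbv with h | h
    · rw [hbb, h, hsn, int_shiftLeft_one_natCast,
        show (0 : Int) = ((0 : Nat) : Int) from rfl, PySem.Int.bor_natCast,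
        nat_lor_two_mul _ 0 (by omega)]
      simp [pvS, h]
      omega
    · rw [hbb, h, hsn, int_shiftLeft_one_natCast,
        show (1 : Int) = ((1 : Nat) : Int) from rfl, PySem.Int.bor_natCast,
        nat_lor_two_mul _ 1 (by omega)]
      simp [pvS, h]
      push_cast
      omega

-- A's loop invariant: with accumulator r < 2^j at position j, the fold returns r + pvS * 2^j.
lemma a_inv (num : Int) : ∀ (l : List Int) (r : Int) (j : Nat), 0 ≤ r → r < 2 ^ j →
    (l.foldl
      (fun (s : Int × Nat) i =>
        let curbit : Int := if PySem.Int.band num (Int.shiftLeft 1 i.toNat) = 0 then 0 else 1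
        (PySem.Int.bor s.1 (Int.shiftLeft curbit s.2), s.2 + 1))
      (r, j)).1 = r + pvS num l * 2 ^ j := by
  intro l
  induction l with
  | nil => intro r j _ _; simp [pvS]
  | cons i t ih =>
    intro r j hr0 hr
    have hb := pvBit_zero_or_one num i.toNat
    rw [List.foldl_cons]
    show (List.foldl
      (fun (s : Int × Nat) i =>
        let curbit : Int := if PySem.Int.band num (Int.shiftLeft 1 i.toNat) = 0 then 0 else 1
        (PySem.Int.bor s.1 (Int.shiftLeft curbit s.2), s.2 + 1))
      (PySem.Int.bor r
        (Int.shiftLeft (if PySem.Int.band num (Int.shiftLeft 1 i.toNat) = 0 then (0 : Int) else 1) j),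
        j + 1) t).1 = r + pvS num (i :: t) * 2 ^ j
    rw [curbit_eq num i.toNat, int_bor_shifted r j (pvBit num i.toNat) hr0 hr hb]
    have h2p : (2 : Int) ^ (j + 1) = 2 * 2 ^ j := by ring
    have hnn : 0 ≤ r + pvBit num i.toNat * 2 ^ j := by
      rcases hb with h | h <;> rw [h] <;> [simpa using hr0; positivity]
    have hlt : r + pvBit num i.toNat * 2 ^ j < 2 ^ (j + 1) := by
      rcases hb with h | h <;> rw [h] <;> omega
    rw [ih (r + pvBit num i.toNat * 2 ^ j) (j + 1) hnn hlt]
    simp [pvS]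
    ring

-- ===== VERDICT (by name: the statement is the Claim_ definition above) =====
theorem sub_int_bits_spec : Claim_equal_sub_int_bits := by
  intro num subindex _ _
  unfold Spec_sub_int_bits sub_int_bits
  rw [a_inv num subindex 0 0 (by omega) (by norm_num), alt_eq_pvS]
  simp
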